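-- pv_equiv track=rewrite | github.com/DominikLudwiczak/master-thesis | main.py | smart_truncate_readme
-- ===== SOURCE A (Python) =====
-- def smart_truncate_readme(readme: str, max_chars: int) -> str:
--     if len(readme) <= max_chars:
--         return readme
--     priority_keywords = ["install", "usage", "run", "experiment", "reproduc", "requirement", "setup"]
--     lines = readme.splitlines()
--     scored, current_section, score = [], [], 0
--     for line in lines:
--         low = line.lower()
--         if low.startswith("#"):
--             if current_section:
--                 scored.append((score, "\n".join(current_section)))
--             current_section, score = [line], sum(k in low for k in priority_keywords)
--         else:
--             current_section.append(line)
--     if current_section: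
--         scored.append((score, "\n".join(current_section)))
--     scored.sort(key=lambda x: -x[0])
--     result = ""
--     for _, section in scored:
--         if len(result) + len(section) > max_chars:
--             break
--         result += section + "\n\n"
--     return result or readme[:max_chars]
-- ===== SOURCE B (Python) =====
-- def smart_truncate_readme(readme: str, max_chars: int) -> str:
--     if len(readme) <= max_chars:
--         return readme
--     priority_keywords = ["install", "usage", "run", "experiment", "reproduc", "requirement", "setup"]
--     lines = readme.splitlines()
--     # bucket sort by score: buckets[s] collects sections with score s, in parse order
--     buckets = [[] for _ in range(8)]
--     current_section, score = [], 0
--     for line in lines: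
--         low = line.lower()
--         if low.startswith("#"):
--             if current_section:
--                 buckets[score].append("\n".join(current_section))
--             current_section, score = [line], sum(k in low for k in priority_keywords)
--         else:
--             current_section.append(line)
--     if current_section:
--         buckets[score].append("\n".join(current_section))
--     result = ""
--     done = False
--     for s in range(7, -1, -1):
--         for section in buckets[s]:
--             if len(result) + len(section) > max_chars:
--                 done = True
--                 break
--             result += section + "\n\n"
--         if done:
--             break
--     return result or readme[:max_chars]
-- ===== Notes on version B (the rewrite author's own statement) =====
-- stated objective: alternative
-- what changed: The stable comparison sort of sections by descending score is replaced by a counting/bucket sort: sections are appended to buckets[score] in parse order and the greedy fill sweeps the buckets from score 7 down to 0, reproducing the stable order without ever calling sort.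
import Mathlib
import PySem

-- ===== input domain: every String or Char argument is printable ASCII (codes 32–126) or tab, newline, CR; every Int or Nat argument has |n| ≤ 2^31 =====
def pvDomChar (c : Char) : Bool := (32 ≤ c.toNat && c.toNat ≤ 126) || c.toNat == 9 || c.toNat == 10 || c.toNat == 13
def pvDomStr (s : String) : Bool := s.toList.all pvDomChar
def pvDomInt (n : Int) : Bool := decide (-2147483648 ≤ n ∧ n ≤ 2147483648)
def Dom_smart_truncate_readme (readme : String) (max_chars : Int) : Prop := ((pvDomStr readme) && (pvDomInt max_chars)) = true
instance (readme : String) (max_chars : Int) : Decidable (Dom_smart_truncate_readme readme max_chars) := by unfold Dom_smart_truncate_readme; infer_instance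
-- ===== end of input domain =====

-- B replaces A's stable comparison sort of sections by a counting/bucket sort over the 8 possible scores;
-- the parse and greedy fill are unchanged, so the output is identical (objective: alternative algorithm).


def pvKeywords : List String := ["install", "usage", "run", "experiment", "reproduc", "requirement", "setup"]

-- ===== PORT A =====
-- loop body of A's parse: state = (scored, current_section, score)
def pvStepA (st : List (Int × String) × List String × Int) (line : String) :
    List (Int × String) × List String × Int :=
  let low := PySem.Str.lower line
  if PySem.Str.startswith low "#" then
    let scored := if st.2.1 ≠ [] then st.1 ++ [(st.2.2, PySem.Str.join "\n" st.2.1)] else st.1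
    (scored, [line], (pvKeywords.map (fun k => if PySem.Str.isIn k low then (1:Int) else 0)).sum)
  else
    (st.1, st.2.1 ++ [line], st.2.2)

-- A's greedy for-loop with break
def pvGreedyA (max_chars : Int) : List (Int × String) → String → String
  | [], result => result
  | (_, sec) :: rest, result =>
      if PySem.Str.len result + PySem.Str.len sec > max_chars then result
      else pvGreedyA max_chars rest (result ++ sec ++ "\n\n")

def smart_truncate_readme (readme : String) (max_chars : Int) : String :=
  if PySem.Str.len readme ≤ max_chars then readme
  else
    let lines := PySem.Str.splitlines readme
    let st := lines.foldl pvStepA ([], [], 0)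
    let scored := if st.2.1 ≠ [] then st.1 ++ [(st.2.2, PySem.Str.join "\n" st.2.1)] else st.1
    let sortedScored := PySem.List.sorted scored (fun x => -x.1) false
    let result := pvGreedyA max_chars sortedScored ""
    if result = "" then PySem.Str.slice readme none (some max_chars) else result

-- ===== PORT B =====
-- buckets[score].append(x): in-place append at index score (always 0 ≤ score < 8 here)
def pvBucketPut (bs : List (List String)) (score : Int) (x : String) : List (List String) :=
  bs.set score.toNat ((PySem.List.pyGetD bs score []) ++ [x])

-- loop body of B's parse: state = (buckets, current_section, score)
def pvStepB (st : List (List String) × List String × Int) (line : String) :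
    List (List String) × List String × Int :=
  let low := PySem.Str.lower line
  if PySem.Str.startswith low "#" then
    let bs := if st.2.1 ≠ [] then pvBucketPut st.1 st.2.2 (PySem.Str.join "\n" st.2.1) else st.1
    (bs, [line], (pvKeywords.map (fun k => if PySem.Str.isIn k low then (1:Int) else 0)).sum)
  else
    (st.1, st.2.1 ++ [line], st.2.2)

-- B's inner for-loop over one bucket: state = (result, done)
def pvInner (max_chars : Int) (sections : List String) (st : String × Bool) : String × Bool :=
  sections.foldl (fun st sec =>
    if st.2 then st
    else if PySem.Str.len st.1 + PySem.Str.len sec > max_chars then (st.1, true)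
    else (st.1 ++ sec ++ "\n\n", st.2)) st

def smart_truncate_readme_alt (readme : String) (max_chars : Int) : String :=
  if PySem.Str.len readme ≤ max_chars then readme
  else
    let lines := PySem.Str.splitlines readme
    let st := lines.foldl pvStepB (List.replicate 8 [], [], 0)
    let bs := if st.2.1 ≠ [] then pvBucketPut st.1 st.2.2 (PySem.Str.join "\n" st.2.1) else st.1
    let fin := (PySem.List.pyRange 7 (-1) (-1)).foldl
      (fun (st : String × Bool) s =>
        if st.2 then st else pvInner max_chars (PySem.List.pyGetD bs s []) st) ("", false)
    if fin.1 = "" then PySem.Str.slice readme none (some max_chars) else fin.1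

-- ===== PRECONDITION & SPEC =====
def Spec_smart_truncate_readme (readme : String) (max_chars : Int) (out : String) : Prop := out = smart_truncate_readme_alt readme max_chars
instance (readme : String) (max_chars : Int) (out : String) : Decidable (Spec_smart_truncate_readme readme max_chars out) := by unfold Spec_smart_truncate_readme; infer_instance

-- ===== CLAIM (what is proved, stated in full; the proofs are below) =====
def Claim_equal_smart_truncate_readme : Prop := ∀ (readme : String) (max_chars : Int), Dom_smart_truncate_readme readme max_chars → Spec_smart_truncate_readme readme max_chars (smart_truncate_readme readme max_chars)

-- ===== LEMMAS AND PROOFS =====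

-- the section texts of score s, in parse order
def pvF (scored : List (Int × String)) (s : Int) : List String :=
  (scored.filter (fun p => decide (p.1 = s))).map Prod.snd

def pvMkBuckets (scored : List (Int × String)) : List (List String) :=
  [pvF scored 0, pvF scored 1, pvF scored 2, pvF scored 3,
   pvF scored 4, pvF scored 5, pvF scored 6, pvF scored 7]

-- relation between the two parse states
def pvInv (a : List (Int × String) × List String × Int)
    (b : List (List String) × List String × Int) : Prop :=
  b.1 = pvMkBuckets a.1 ∧ b.2.1 = a.2.1 ∧ b.2.2 = a.2.2 ∧
  (∀ p ∈ a.1, 0 ≤ p.1 ∧ p.1 ≤ 7) ∧ 0 ≤ a.2.2 ∧ a.2.2 ≤ 7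

theorem pvF_append (scored : List (Int × String)) (s t : Int) (x : String) :
    pvF (scored ++ [(t, x)]) s = pvF scored s ++ (if t = s then [x] else []) := by
  simp [pvF, List.filter_append]
  split_ifs with h <;> simp [h]

theorem pvBucketPut_mk (scored : List (Int × String)) (s : Int) (x : String)
    (h0 : 0 ≤ s) (h7 : s ≤ 7) :
    pvBucketPut (pvMkBuckets scored) s x = pvMkBuckets (scored ++ [(s, x)]) := by
  interval_cases s <;>
    simp [pvBucketPut, pvMkBuckets, pvF_append, PySem.List.pyGetD ,
      List.set]

theorem pvSum_bounds (low : String) :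
    0 ≤ ((pvKeywords.map (fun k => if PySem.Str.isIn k low then (1:Int) else 0)).sum) ∧
    ((pvKeywords.map (fun k => if PySem.Str.isIn k low then (1:Int) else 0)).sum) ≤ 7 := by
  simp [pvKeywords]
  split_ifs <;> norm_num

theorem pvStep_inv (a : List (Int × String) × List String × Int)
    (b : List (List String) × List String × Int) (line : String)
    (h : pvInv a b) : pvInv (pvStepA a line) (pvStepB b line) := by
  obtain ⟨hb, hc, hs, hall, hs0, hs7⟩ := h
  unfold pvStepA pvStepB pvInv
  by_cases hh : PySem.Str.startswith (PySem.Str.lower line) "#" = true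
  · simp only [hh, if_true]
    refine ⟨?_, by trivial, by trivial, ?_, (pvSum_bounds _).1, (pvSum_bounds _).2⟩
    · rw [hc, hs, hb]
      split_ifs with hne
      · exact pvBucketPut_mk _ _ _ hs0 hs7
      · rfl
    · split_ifs with hne
      · intro p hp
        rcases List.mem_append.1 hp with hp | hp
        · exact hall p hp
        · simp at hp; subst hp; simp; omega
      · exact hall
  · simp only [eq_false_of_ne_true hh, Bool.false_eq_true, if_false]
    exact ⟨hb, by simp [hc], hs, hall, hs0, hs7⟩

theorem pvFold_inv (lines : List String)
    (a : List (Int × String) × List String × Int)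
    (b : List (List String) × List String × Int) (h : pvInv a b) :
    pvInv (lines.foldl pvStepA a) (lines.foldl pvStepB b) := by
  induction lines generalizing a b with
  | nil => exact h
  | cons l ls ih => exact ih _ _ (pvStep_inv a b l h)

-- === counting sort = stable sort ===

theorem pvInsertBy_append (before : (Int × String) → (Int × String) → Bool)
    (x : Int × String) (ys zs : List (Int × String))
    (h : ∀ y ∈ ys, before x y = false) :
    PySem.List.insertBy before x (ys ++ zs) = ys ++ PySem.List.insertBy before x zs := by
  induction ys with
  | nil => rfl
  | cons y ys ih =>
      simp only [List.cons_append, PySem.List.insertBy, h y (by simp)]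
      simp only [Bool.false_eq_true, if_false, List.cons.injEq, true_and]
      exact ih (fun y hy => h y (by simp [hy]))

theorem pvInsertBy_front (before : (Int × String) → (Int × String) → Bool)
    (x : Int × String) (zs : List (Int × String))
    (h : ∀ y ∈ zs, before x y = true) :
    PySem.List.insertBy before x zs = x :: zs := by
  cases zs with
  | nil => rfl
  | cons z zs => simp [PySem.List.insertBy, h z (by simp)]

def pvFlatP (ss : List Int) (xs : List (Int × String)) : List (Int × String) :=
  ss.flatMap (fun s => xs.filter (fun p => decide (p.1 = s)))

theorem pvMem_flatP (ss : List Int) (xs : List (Int × String)) (y : Int × String)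
    (hy : y ∈ pvFlatP ss xs) : y ∈ xs ∧ y.1 ∈ ss := by
  simp only [pvFlatP, List.mem_flatMap, List.mem_filter] at hy
  obtain ⟨s, hs, hyx, hey⟩ := hy
  simp at hey
  exact ⟨hyx, hey ▸ hs⟩

theorem pvInsert_flatP (ss : List Int) (hss : ss.Pairwise (· > ·))
    (x : Int × String) (hx : x.1 ∈ ss) (xs : List (Int × String)) :
    PySem.List.insertBy (fun a b => decide ((fun p : Int × String => -p.1) a < (fun p : Int × String => -p.1) b)) x (pvFlatP ss xs)
      = pvFlatP ss (xs ++ [x]) := by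
  induction ss with
  | nil => simp at hx
  | cons s ss ih =>
      rw [List.pairwise_cons] at hss
      have hflat : ∀ ys : List (Int × String), pvFlatP (s :: ss) ys
          = ys.filter (fun p => decide (p.1 = s)) ++ pvFlatP ss ys := by
        intro ys; simp [pvFlatP]
      by_cases hxs : x.1 = s
      · -- x belongs to the head bucket: skip it, then insert in front of the rest
        have htail : pvFlatP ss (xs ++ [x]) = pvFlatP ss xs := by
          simp only [pvFlatP, List.filter_append]
          refine List.flatMap_congr (fun t ht => ?_)
          have hne : ¬ (x.1 = t) := by have := hss.1 t ht; omega
          simp [hne]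
        rw [hflat, hflat, pvInsertBy_append _ _ _ _ (fun y hy => by
            simp only [List.mem_filter] at hy
            have : y.1 = s := by simpa using hy.2
            simp only [decide_eq_false_iff_not, not_lt]
            omega),
          pvInsertBy_front _ _ _ (fun y hy => by
            obtain ⟨_, hys⟩ := pvMem_flatP ss xs y hy
            have : y.1 < s := hss.1 y.1 hys
            simp only [decide_eq_true_eq]
            omega),
          htail]
        simp [List.filter_append, hxs]
      · -- x belongs to a later bucket
        have hx' : x.1 ∈ ss := by
          rcases List.mem_cons.1 hx with h | h
          · exact absurd h hxs
          · exact h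
        have hxlt : x.1 < s := hss.1 x.1 hx'
        rw [hflat, hflat, pvInsertBy_append _ _ _ _ (fun y hy => by
            simp only [List.mem_filter] at hy
            have : y.1 = s := by simpa using hy.2
            simp only [decide_eq_false_iff_not, not_lt]
            omega),
          ih hss.2 hx']
        have : ¬ ((x.1 = s)) := hxs
        simp [List.filter_append, this]

theorem pvSorted_eq_flatP (scored : List (Int × String))
    (h : ∀ p ∈ scored, 0 ≤ p.1 ∧ p.1 ≤ 7) :
    PySem.List.sorted scored (fun x => -x.1) false
      = pvFlatP [7, 6, 5, 4, 3, 2, 1, 0] scored := by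
  rw [PySem.List.sorted_eq_foldl_insertBy]
  induction scored using List.reverseRecOn with
  | nil => rfl
  | append_singleton xs x ih =>
      rw [List.foldl_append, List.foldl_cons, List.foldl_nil,
        ih (fun p hp => h p (by simp [hp]))]
      refine pvInsert_flatP _ (by decide) x ?_ xs
      have := h x (by simp)
      simp; omega

-- === the greedy loop ===

theorem pvInner_done (max_chars : Int) (sections : List String) (r : String) :
    pvInner max_chars sections (r, true) = (r, true) := by
  induction sections with
  | nil => rfl
  | cons s ss ih => simpa [pvInner] using ih

theorem pvGreedy_inner (max_chars : Int) (pairs : List (Int × String)) (r : String) :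
    pvGreedyA max_chars pairs r = (pvInner max_chars (pairs.map Prod.snd) (r, false)).1 := by
  induction pairs generalizing r with
  | nil => rfl
  | cons p ps ih =>
      obtain ⟨s, sec⟩ := p
      simp only [pvGreedyA, pvInner, List.map_cons, List.foldl_cons, Bool.false_eq_true,
        if_false]
      by_cases hgt : PySem.Str.len r + PySem.Str.len sec > max_chars
      · rw [if_pos hgt, if_pos hgt]
        have hdone := pvInner_done max_chars (ps.map Prod.snd) r
        simp only [pvInner] at hdone
        rw [hdone]
      · rw [if_neg hgt, if_neg hgt]
        have := ih (r ++ sec ++ "\n\n")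
        simpa only [pvInner] using this

theorem pvInner_append (max_chars : Int) (xs ys : List String) (st : String × Bool) :
    pvInner max_chars (xs ++ ys) st = pvInner max_chars ys (pvInner max_chars xs st) := by
  simp [pvInner, List.foldl_append]

theorem pvOuter_flatten (max_chars : Int) (bl : List (List String)) (st : String × Bool) :
    bl.foldl (fun st b => if st.2 then st else pvInner max_chars b st) st
      = pvInner max_chars bl.flatten st := by
  induction bl generalizing st with
  | nil => rfl
  | cons b bl ih =>
      rw [List.foldl_cons, List.flatten_cons, pvInner_append, ← ih]
      by_cases hd : st.2
      · obtain ⟨r, d⟩ := st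
        simp at hd; subst hd
        simp [pvInner_done]
      · simp [hd]

theorem pvMap_snd_flatP (ss : List Int) (xs : List (Int × String)) :
    (pvFlatP ss xs).map Prod.snd = ss.flatMap (fun s => pvF xs s) := by
  simp [pvFlatP, pvF, List.map_flatMap]

-- ===== VERDICT (by name: the statement is the Claim_ definition above) =====
theorem smart_truncate_readme_spec : Claim_equal_smart_truncate_readme := by
  intro readme max_chars _
  unfold Spec_smart_truncate_readme
  unfold smart_truncate_readme smart_truncate_readme_alt
  by_cases hle : PySem.Str.len readme ≤ max_chars
  · rw [if_pos hle, if_pos hle]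
  · simp only [hle, if_false]
    have hinv0 : pvInv ([], [], 0) (List.replicate 8 [], [], 0) := by
      refine ⟨by simp [pvMkBuckets, pvF, List.replicate], rfl, rfl, by simp, by norm_num⟩
    have hinv := pvFold_inv (PySem.Str.splitlines readme) _ _ hinv0
    set stA := (PySem.Str.splitlines readme).foldl pvStepA ([], [], 0) with hstA
    set stB := (PySem.Str.splitlines readme).foldl pvStepB (List.replicate 8 [], [], 0) with hstB
    obtain ⟨hb, hc, hs, hall, hs0, hs7⟩ := hinv
    -- final flush
    set scored := (if stA.2.1 ≠ [] then stA.1 ++ [(stA.2.2, PySem.Str.join "\n" stA.2.1)] else stA.1) with hscored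
    have hbs : (if stB.2.1 ≠ [] then pvBucketPut stB.1 stB.2.2 (PySem.Str.join "\n" stB.2.1) else stB.1)
        = pvMkBuckets scored := by
      rw [hb, hc, hs, hscored]
      split_ifs with hne
      · exact pvBucketPut_mk _ _ _ hs0 hs7
      · rfl
    have hall' : ∀ p ∈ scored, 0 ≤ p.1 ∧ p.1 ≤ 7 := by
      rw [hscored]
      split_ifs with hne
      · intro p hp
        rcases List.mem_append.1 hp with hp | hp
        · exact hall p hp
        · simp at hp; subst hp; simp; omega
      · exact hall
    rw [hbs]
    -- the greedy results agree
    have hrange : PySem.List.pyRange 7 (-1) (-1) = [7, 6, 5, 4, 3, 2, 1, 0] := by decide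
    have hget : ([(7:Int), 6, 5, 4, 3, 2, 1, 0].map
        (fun s => PySem.List.pyGetD (pvMkBuckets scored) s []))
        = [pvF scored 7, pvF scored 6, pvF scored 5, pvF scored 4,
           pvF scored 3, pvF scored 2, pvF scored 1, pvF scored 0] := by
      simp [pvMkBuckets, PySem.List.pyGetD]
    have houter : (PySem.List.pyRange 7 (-1) (-1)).foldl
        (fun (st : String × Bool) s =>
          if st.2 then st else pvInner max_chars (PySem.List.pyGetD (pvMkBuckets scored) s []) st)
        ("", false)
        = pvInner max_chars
            ([pvF scored 7, pvF scored 6, pvF scored 5, pvF scored 4,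
              pvF scored 3, pvF scored 2, pvF scored 1, pvF scored 0].flatten) ("", false) := by
      rw [hrange, ← pvOuter_flatten, ← hget, List.foldl_map]
    have hgreedy : pvGreedyA max_chars (PySem.List.sorted scored (fun x => -x.1) false) ""
        = ((PySem.List.pyRange 7 (-1) (-1)).foldl
            (fun (st : String × Bool) s =>
              if st.2 then st else pvInner max_chars (PySem.List.pyGetD (pvMkBuckets scored) s []) st)
            ("", false)).1 := by
      rw [houter, pvSorted_eq_flatP scored hall', pvGreedy_inner, pvMap_snd_flatP]
      simp
    rw [hgreedy]
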